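-- pv_equiv track=rewrite | github.com/qkanji/Qayim-Kanji-Science-Fair-Public | MarkTranscription.py | one_or_two_off
-- ===== SOURCE A (Python) =====
-- def one_or_two_off(actual_word, guess_word):
--     errors = 0
--     actual_word = list(actual_word)
--     guess_word = list(guess_word)
--     for letter in guess_word:
--         if letter in actual_word:
--             actual_word.remove(letter)
--         else:
--             errors += 1
--     errors += len(actual_word)
--     if errors <= 2:
--         return True
--     return False
-- ===== SOURCE B (Python) =====
-- def one_or_two_off(actual_word, guess_word):
--     sa = sorted(actual_word)
--     sg = sorted(guess_word)
--     i = j = errors = 0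
--     while i < len(sa) and j < len(sg):
--         if sa[i] == sg[j]:
--             i += 1
--             j += 1
--         elif sa[i] < sg[j]:
--             errors += 1
--             i += 1
--         else:
--             errors += 1
--             j += 1
--     errors += (len(sa) - i) + (len(sg) - j)
--     return errors <= 2
-- ===== Notes on version B (the rewrite author's own statement) =====
-- stated objective: faster
-- what changed: Replaces A's per-letter membership scan and in-place remove on a copy of actual_word by sorting both words and counting mismatches in a single two-pointer merge pass.
import Mathlib
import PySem

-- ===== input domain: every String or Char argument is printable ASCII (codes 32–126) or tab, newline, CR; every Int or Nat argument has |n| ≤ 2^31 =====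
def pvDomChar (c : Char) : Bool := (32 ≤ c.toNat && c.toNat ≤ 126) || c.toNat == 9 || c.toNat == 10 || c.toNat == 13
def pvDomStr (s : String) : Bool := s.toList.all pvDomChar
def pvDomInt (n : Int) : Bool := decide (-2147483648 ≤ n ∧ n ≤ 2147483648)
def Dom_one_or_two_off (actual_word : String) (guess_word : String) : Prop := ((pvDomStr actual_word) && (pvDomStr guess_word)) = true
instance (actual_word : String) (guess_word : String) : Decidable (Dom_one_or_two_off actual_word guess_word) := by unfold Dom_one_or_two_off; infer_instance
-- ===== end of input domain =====

-- B replaces A's quadratic remove-from-a-copy scan by sort + one two-pointer merge pass (objective: faster).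

-- ===== PORT A =====
-- A: copy actual_word to a list, for each guess letter remove a matching one or count an
-- error, finally add the leftover letters of actual_word; True iff errors ≤ 2.
def one_or_two_off (actual_word : String) (guess_word : String) : Bool :=
  let st := guess_word.toList.foldl
    (fun (st : List Char × Int) letter =>
      if letter ∈ st.1 then
        ((PySem.List.remove? st.1 letter).getD st.1, st.2)   -- guarded by the membership test, so remove? is some
      else
        (st.1, st.2 + 1))
    (actual_word.toList, 0)
  let errors : Int := st.2 + (st.1.length : Int)
  if errors ≤ 2 then true else false

-- ===== PORT B =====
-- the while loop of Source B on the two sorted lists: indices i, j become the suffixes;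
-- the post-loop 'errors += remaining tails' is the base case of the recursion
def pvMerge : List Char → List Char → Nat
  | [], sg => sg.length
  | x :: xs, [] => (x :: xs).length
  | x :: xs, y :: ys =>
      if x = y then pvMerge xs ys
      else if x < y then 1 + pvMerge xs (y :: ys)
      else 1 + pvMerge (x :: xs) ys

def one_or_two_off_alt (actual_word : String) (guess_word : String) : Bool :=
  let sa := PySem.List.sorted actual_word.toList (fun c => c) false
  let sg := PySem.List.sorted guess_word.toList (fun c => c) false
  decide (pvMerge sa sg ≤ 2)

-- ===== PRECONDITION & SPEC =====
def Spec_one_or_two_off (actual_word : String) (guess_word : String) (out : Bool) : Prop := out = one_or_two_off_alt actual_word guess_word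
instance (actual_word : String) (guess_word : String) (out : Bool) : Decidable (Spec_one_or_two_off actual_word guess_word out) := by unfold Spec_one_or_two_off; infer_instance

-- ===== CLAIM (what is proved, stated in full; the proofs are below) =====
def Claim_equal_one_or_two_off : Prop := ∀ (actual_word : String) (guess_word : String), Dom_one_or_two_off actual_word guess_word → Spec_one_or_two_off actual_word guess_word (one_or_two_off actual_word guess_word)

-- ===== LEMMAS AND PROOFS =====

-- multiset bookkeeping for one loop step that finds a match
lemma pv_ms_mem (l : Char) (act g : Multiset Char) (h : l ∈ act) :
    (l ::ₘ g) - act = g - act.erase l ∧ act - (l ::ₘ g) = act.erase l - g := by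
  have h1 : 1 ≤ act.count l := Multiset.one_le_count_iff_mem.mpr h
  refine ⟨?_, ?_⟩ <;> ext c <;> by_cases hc : c = l
  · subst hc
    rw [Multiset.count_sub, Multiset.count_cons_self, Multiset.count_sub,
        Multiset.count_erase_self]
    omega
  · rw [Multiset.count_sub, Multiset.count_cons_of_ne hc, Multiset.count_sub,
        Multiset.count_erase_of_ne hc]
  · subst hc
    rw [Multiset.count_sub, Multiset.count_cons_self, Multiset.count_sub,
        Multiset.count_erase_self]
    omega
  · rw [Multiset.count_sub, Multiset.count_cons_of_ne hc, Multiset.count_sub,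
        Multiset.count_erase_of_ne hc]

-- … and for a step that finds none
lemma pv_ms_not_mem (l : Char) (act g : Multiset Char) (h : l ∉ act) :
    (l ::ₘ g) - act = l ::ₘ (g - act) ∧ act - (l ::ₘ g) = act - g := by
  have hc0 : act.count l = 0 := Multiset.count_eq_zero.mpr h
  refine ⟨?_, ?_⟩ <;> ext c <;> by_cases hc : c = l
  · subst hc
    rw [Multiset.count_sub, Multiset.count_cons_self, Multiset.count_cons_self,
        Multiset.count_sub]
    omega
  · rw [Multiset.count_sub, Multiset.count_cons_of_ne hc, Multiset.count_cons_of_ne hc,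
        Multiset.count_sub]
  · subst hc
    rw [Multiset.count_sub, Multiset.count_cons_self, Multiset.count_sub]
    omega
  · rw [Multiset.count_sub, Multiset.count_cons_of_ne hc, Multiset.count_sub]

-- A's loop computes the size of the multiset symmetric difference
lemma pv_A_loop (g : List Char) : ∀ (act : List Char) (e : Int),
    (g.foldl
      (fun (st : List Char × Int) letter =>
        if letter ∈ st.1 then ((PySem.List.remove? st.1 letter).getD st.1, st.2)
        else (st.1, st.2 + 1)) (act, e)).2
      + (((g.foldl
      (fun (st : List Char × Int) letter =>
        if letter ∈ st.1 then ((PySem.List.remove? st.1 letter).getD st.1, st.2)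
        else (st.1, st.2 + 1)) (act, e)).1.length : Int))
    = e + ((((g : Multiset Char) - (act : Multiset Char)).card : Int))
        + ((((act : Multiset Char) - (g : Multiset Char)).card : Int)) := by
  induction g with
  | nil => intro act e; simp
  | cons l g ih =>
    intro act e
    by_cases hl : l ∈ act
    · have hrem : PySem.List.remove? act l = some (act.erase l) :=
        PySem.List.remove?_eq_some_erase act l hl
      have hms := pv_ms_mem l (act : Multiset Char) (g : Multiset Char) (by simpa using hl)
      simp only [List.foldl_cons, if_pos hl, hrem, Option.getD_some]
      rw [ih (act.erase l) e]
      rw [show ((l :: g : List Char) : Multiset Char) = l ::ₘ (g : Multiset Char) from rfl]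
      rw [show ((act.erase l : List Char) : Multiset Char) = (act : Multiset Char).erase l from
        (Multiset.coe_erase act l).symm]
      rw [hms.1, hms.2]
    · have hms := pv_ms_not_mem l (act : Multiset Char) (g : Multiset Char) (by simpa using hl)
      simp only [List.foldl_cons, if_neg hl]
      rw [ih act (e + 1)]
      rw [show ((l :: g : List Char) : Multiset Char) = l ::ₘ (g : Multiset Char) from rfl]
      rw [hms.1, hms.2, Multiset.card_cons]
      push_cast
      ring

-- the two-pointer merge on sorted lists computes the same quantity
lemma pv_merge_card : ∀ (sa sg : List Char), sa.Pairwise (· ≤ ·) → sg.Pairwise (· ≤ ·) →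
    pvMerge sa sg
      = ((sa : Multiset Char) - (sg : Multiset Char)).card
        + ((sg : Multiset Char) - (sa : Multiset Char)).card := by
  intro sa sg
  induction sa, sg using pvMerge.induct with
  | case1 sg => intro _ _; simp [pvMerge]
  | case2 x xs => intro _ _; simp [pvMerge]
  | case3 xs x ys ih =>
    intro ha hg
    have h1 : ((x :: xs : List Char) : Multiset Char) - ((x :: ys : List Char) : Multiset Char)
        = (xs : Multiset Char) - (ys : Multiset Char) := by
      rw [show ((x :: ys : List Char) : Multiset Char) = x ::ₘ (ys : Multiset Char) from rfl,
          Multiset.sub_cons]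
      simp
    have h2 : ((x :: ys : List Char) : Multiset Char) - ((x :: xs : List Char) : Multiset Char)
        = (ys : Multiset Char) - (xs : Multiset Char) := by
      rw [show ((x :: xs : List Char) : Multiset Char) = x ::ₘ (xs : Multiset Char) from rfl,
          Multiset.sub_cons]
      simp
    simp only [pvMerge]
    rw [if_pos trivial, h1, h2, ih (List.Pairwise.of_cons ha) (List.Pairwise.of_cons hg)]
  | case4 x xs y ys hne hlt ih =>
    intro ha hg
    have hx : x ∉ (y :: ys : List Char) := by
      intro hmem
      rcases List.mem_cons.mp hmem with hmem | hmem
      · exact hne hmem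
      · exact absurd (lt_of_lt_of_le hlt ((List.pairwise_cons.mp hg).1 _ hmem)) (lt_irrefl x)
    have hms := pv_ms_not_mem x ((y :: ys : List Char) : Multiset Char) (xs : Multiset Char)
      (by simpa using hx)
    simp only [pvMerge, if_neg hne, if_pos hlt]
    rw [ih (List.Pairwise.of_cons ha) hg]
    rw [show ((x :: xs : List Char) : Multiset Char) = x ::ₘ (xs : Multiset Char) from rfl]
    rw [hms.1, hms.2, Multiset.card_cons]
    omega
  | case5 x xs y ys hne hnlt ih =>
    intro ha hg
    have hylt : y < x := by
      rcases lt_trichotomy x y with h | h | h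
      · exact absurd h hnlt
      · exact absurd h hne
      · exact h
    have hy : y ∉ (x :: xs : List Char) := by
      intro hmem
      rcases List.mem_cons.mp hmem with hmem | hmem
      · exact absurd hylt (hmem ▸ lt_irrefl x)
      · exact absurd (lt_of_lt_of_le hylt ((List.pairwise_cons.mp ha).1 _ hmem)) (lt_irrefl y)
    have hms := pv_ms_not_mem y ((x :: xs : List Char) : Multiset Char) (ys : Multiset Char)
      (by simpa using hy)
    simp only [pvMerge, if_neg hne, if_neg hnlt]
    rw [ih ha (List.Pairwise.of_cons hg)]
    rw [show ((y :: ys : List Char) : Multiset Char) = y ::ₘ (ys : Multiset Char) from rfl]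
    rw [hms.1, hms.2, Multiset.card_cons]
    omega

-- ===== VERDICT (by name: the statement is the Claim_ definition above) =====
theorem one_or_two_off_spec : Claim_equal_one_or_two_off := by
  intro a g _
  unfold Spec_one_or_two_off one_or_two_off one_or_two_off_alt
  have hA := pv_A_loop g.toList a.toList 0
  have hsa : ((PySem.List.sorted a.toList (fun c => c) false : List Char) : Multiset Char)
      = (a.toList : Multiset Char) :=
    Quot.sound (PySem.List.sorted_perm a.toList (fun c => c) false)
  have hsg : ((PySem.List.sorted g.toList (fun c => c) false : List Char) : Multiset Char)
      = (g.toList : Multiset Char) :=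
    Quot.sound (PySem.List.sorted_perm g.toList (fun c => c) false)
  have hB := pv_merge_card (PySem.List.sorted a.toList (fun c => c) false)
      (PySem.List.sorted g.toList (fun c => c) false)
      (PySem.List.sorted_pairwise a.toList (fun c => c))
      (PySem.List.sorted_pairwise g.toList (fun c => c))
  rw [hsa, hsg] at hB
  simp only [hB]
  split_ifs with h
  · rw [hA] at h
    symm
    rw [decide_eq_true_eq]
    omega
  · rw [hA] at h
    symm
    rw [decide_eq_false_iff_not]
    omega
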